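-- pv_equiv track=rewrite | github.com/vinodvv/python-challenges | day_8.py | find_odd_even
-- ===== SOURCE A (Python) =====
-- def find_odd_even(numbers):
--     odd = []
--     even = []
--     for num in numbers:
--         match (num % 2 == 0):
--             case True:
--                 even.append(num)
--             case False:
--                 odd.append(num)
--     difference = max(even) - min(odd)
--     return difference
-- ===== SOURCE B (Python) =====
-- def find_odd_even(numbers):
--     max_even = None
--     min_odd = None
--     for num in numbers:
--         if num % 2 == 0:
--             if max_even is None or max_even < num:
--                 max_even = num
--         else:
--             if min_odd is None or num < min_odd:
--                 min_odd = num
--     if max_even is None: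
--         raise ValueError("max() arg is an empty sequence")
--     if min_odd is None:
--         raise ValueError("min() arg is an empty sequence")
--     return max_even - min_odd
-- ===== Notes on version B (the rewrite author's own statement) =====
-- stated objective: alternative
-- what changed: Replaces building two intermediate lists and then scanning them with max()/min() by a single pass that maintains two scalar running extrema (max_even, min_odd).
-- outside the precondition, e.g. on find_odd_even([]): A raises ValueError, B raises ValueError; on find_odd_even([2, 4]): A raises ValueError, B raises ValueError; on find_odd_even([1, 3]): A raises ValueError, B raises ValueError
import Mathlib
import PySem

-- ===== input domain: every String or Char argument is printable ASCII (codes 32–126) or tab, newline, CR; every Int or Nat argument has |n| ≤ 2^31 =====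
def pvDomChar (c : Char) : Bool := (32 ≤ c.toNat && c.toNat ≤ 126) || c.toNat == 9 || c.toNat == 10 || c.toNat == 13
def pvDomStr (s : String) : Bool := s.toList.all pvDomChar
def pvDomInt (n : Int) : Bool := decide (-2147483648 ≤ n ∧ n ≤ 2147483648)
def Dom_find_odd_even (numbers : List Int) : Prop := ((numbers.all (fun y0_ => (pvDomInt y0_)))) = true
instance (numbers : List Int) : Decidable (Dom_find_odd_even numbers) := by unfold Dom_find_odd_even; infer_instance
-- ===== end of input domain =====

-- B replaces A's two intermediate lists plus max()/min() scans by one pass with two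
-- scalar running extrema (objective: alternative decomposition, same O(n) cost).
-- Pre_ excludes inputs with no even or no odd element, on which both A and B raise ValueError.

-- ===== PORT A =====
def find_odd_even (numbers : List Int) : Int :=
  let st := numbers.foldl
    (fun (st : List Int × List Int) num =>
      if PySem.Int.mod num 2 == 0 then (st.1, st.2 ++ [num]) else (st.1 ++ [num], st.2))
    ([], [])
  -- max(even) - min(odd); outside Pre_ Python raises ValueError (getD 0 is never reached under Pre_)
  ((PySem.List.max? st.2 (fun x => x)).getD 0) - ((PySem.List.min? st.1 (fun x => x)).getD 0)

-- ===== PORT B =====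
def find_odd_even_alt (numbers : List Int) : Int :=
  let st := numbers.foldl
    (fun (st : Option Int × Option Int) num =>
      if PySem.Int.mod num 2 == 0 then
        (some (match st.1 with | none => num | some m => if m < num then num else m), st.2)
      else
        (st.1, some (match st.2 with | none => num | some m => if num < m then num else m)))
    (none, none)
  match st with
  | (some me, some mo) => me - mo
  | _ => 0  -- unreachable under Pre_: Python B raises ValueError here

-- ===== PRECONDITION & SPEC =====
-- Pre_ excludes exactly the inputs on which A raises ValueError: lists with no even
-- element (max([]) ) or no odd element (min([])); B raises ValueError there too.
def Pre_find_odd_even (numbers : List Int) : Prop :=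
  (numbers.any (fun n => PySem.Int.mod n 2 == 0)) = true ∧
  (numbers.any (fun n => !(PySem.Int.mod n 2 == 0))) = true
instance (numbers : List Int) : Decidable (Pre_find_odd_even numbers) := by
  unfold Pre_find_odd_even; infer_instance

def pvWitness_find_odd_even : List Int := [4, 7, 2]

def Spec_find_odd_even (numbers : List Int) (out : Int) : Prop := out = find_odd_even_alt numbers
instance (numbers : List Int) (out : Int) : Decidable (Spec_find_odd_even numbers out) := by
  unfold Spec_find_odd_even; infer_instance

-- ===== CLAIM (what is proved, stated in full; the proofs are below) =====
def Claim_equal_find_odd_even : Prop := ∀ (numbers : List Int), Dom_find_odd_even numbers → Pre_find_odd_even numbers → Spec_find_odd_even numbers (find_odd_even numbers)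

-- ===== LEMMAS AND PROOFS =====

-- Python max over a list extended at the back = one running-max update.
lemma max?_id_snoc (xs : List Int) (n : Int) :
    PySem.List.max? (xs ++ [n]) (fun x => x) =
      some (match PySem.List.max? xs (fun x => x) with
            | none => n
            | some m => if m < n then n else m) := by
  cases xs with
  | nil => simp [PySem.List.max?]
  | cons x t =>
    simp only [List.cons_append, PySem.List.max?_id_cons, List.foldl_append, List.foldl]
    congr 1
    rcases le_or_gt (t.foldl max x) n with h | h
    · rw [max_eq_right h]
      rcases lt_or_eq_of_le h with h' | h' <;> simp [h']
    · rw [max_eq_left (le_of_lt h)]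
      simp
      omega

lemma min?_id_snoc (xs : List Int) (n : Int) :
    PySem.List.min? (xs ++ [n]) (fun x => x) =
      some (match PySem.List.min? xs (fun x => x) with
            | none => n
            | some m => if n < m then n else m) := by
  cases xs with
  | nil => simp [PySem.List.min?]
  | cons x t =>
    simp only [List.cons_append, PySem.List.min?_id_cons, List.foldl_append, List.foldl]
    congr 1
    rcases le_or_gt x (t.foldl min x) with _ | _ <;>
    · rcases le_or_gt (t.foldl min x) n with h | h
      · simp [min_eq_left h]; omega
      · simp [min_eq_right (le_of_lt h)]; omega

-- Loop invariant: B's scalar state is (max? of A's even list, min? of A's odd list).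
lemma loop_inv (numbers : List Int) (odd even : List Int) :
    numbers.foldl
      (fun (st : Option Int × Option Int) num =>
        if PySem.Int.mod num 2 == 0 then
          (some (match st.1 with | none => num | some m => if m < num then num else m), st.2)
        else
          (st.1, some (match st.2 with | none => num | some m => if num < m then num else m)))
      (PySem.List.max? even (fun x => x), PySem.List.min? odd (fun x => x))
    = (let st := numbers.foldl
        (fun (st : List Int × List Int) num =>
          if PySem.Int.mod num 2 == 0 then (st.1, st.2 ++ [num]) else (st.1 ++ [num], st.2))
        (odd, even)
       (PySem.List.max? st.2 (fun x => x), PySem.List.min? st.1 (fun x => x))) := by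
  induction numbers generalizing odd even with
  | nil => simp
  | cons n t ih =>
    simp only [List.foldl]
    by_cases h : (PySem.Int.mod n 2 == 0) = true
    · rw [if_pos h, if_pos h, ← max?_id_snoc]
      exact ih odd (even ++ [n])
    · rw [if_neg h, if_neg h, ← min?_id_snoc]
      exact ih (odd ++ [n]) even

lemma any_even_ne_nil {numbers : List Int} (h : (numbers.any (fun n => PySem.Int.mod n 2 == 0)) = true) :
    (numbers.foldl
      (fun (st : List Int × List Int) num =>
        if PySem.Int.mod num 2 == 0 then (st.1, st.2 ++ [num]) else (st.1 ++ [num], st.2))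
      ([], [])).2 ≠ [] := by
  have key : ∀ (l : List Int) (odd even : List Int),
      ((l.any (fun n => PySem.Int.mod n 2 == 0)) = true ∨ even ≠ []) →
      (l.foldl
        (fun (st : List Int × List Int) num =>
          if PySem.Int.mod num 2 == 0 then (st.1, st.2 ++ [num]) else (st.1 ++ [num], st.2))
        (odd, even)).2 ≠ [] := by
    intro l
    induction l with
    | nil => intro odd even h'; simpa using h'.resolve_left (by simp)
    | cons n t ih =>
      intro odd even h'
      simp only [List.foldl]
      by_cases hn : (PySem.Int.mod n 2 == 0) = true
      · rw [if_pos hn]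
        exact ih odd (even ++ [n]) (Or.inr (by simp))
      · rw [if_neg hn]
        refine ih (odd ++ [n]) even ?_
        rcases h' with h' | h'
        · rw [List.any_cons] at h'
          rcases Bool.or_eq_true_iff.mp h' with h'' | h''
          · exact absurd h'' hn
          · exact Or.inl h''
        · exact Or.inr h'
  exact key numbers [] [] (Or.inl h)

lemma any_odd_ne_nil {numbers : List Int} (h : (numbers.any (fun n => !(PySem.Int.mod n 2 == 0))) = true) :
    (numbers.foldl
      (fun (st : List Int × List Int) num =>
        if PySem.Int.mod num 2 == 0 then (st.1, st.2 ++ [num]) else (st.1 ++ [num], st.2))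
      ([], [])).1 ≠ [] := by
  have key : ∀ (l : List Int) (odd even : List Int),
      ((l.any (fun n => !(PySem.Int.mod n 2 == 0))) = true ∨ odd ≠ []) →
      (l.foldl
        (fun (st : List Int × List Int) num =>
          if PySem.Int.mod num 2 == 0 then (st.1, st.2 ++ [num]) else (st.1 ++ [num], st.2))
        (odd, even)).1 ≠ [] := by
    intro l
    induction l with
    | nil => intro odd even h'; simpa using h'.resolve_left (by simp)
    | cons n t ih =>
      intro odd even h'
      simp only [List.foldl]
      by_cases hn : (PySem.Int.mod n 2 == 0) = true
      · rw [if_pos hn]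
        refine ih odd (even ++ [n]) ?_
        rcases h' with h' | h'
        · rw [List.any_cons] at h'
          rcases Bool.or_eq_true_iff.mp h' with h'' | h''
          · exact absurd hn (by simpa using h'')
          · exact Or.inl h''
        · exact Or.inr h'
      · rw [if_neg hn]
        exact ih (odd ++ [n]) even (Or.inr (by simp))
  exact key numbers [] [] (Or.inl h)

-- ===== VERDICT (by name: the statement is the Claim_ definition above) =====
theorem find_odd_even_spec : Claim_equal_find_odd_even := by
  intro numbers _ hpre
  obtain ⟨he, ho⟩ := hpre
  unfold Spec_find_odd_even find_odd_even find_odd_even_alt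
  rw [show ((none : Option Int), (none : Option Int)) =
      (PySem.List.max? ([] : List Int) (fun x => x), PySem.List.min? ([] : List Int) (fun x => x))
      from by simp [PySem.List.max?, PySem.List.min?]]
  rw [loop_inv numbers [] []]
  set st := numbers.foldl
    (fun (st : List Int × List Int) num =>
      if PySem.Int.mod num 2 == 0 then (st.1, st.2 ++ [num]) else (st.1 ++ [num], st.2))
    ([], []) with hst
  have h2 : st.2 ≠ [] := any_even_ne_nil he
  have h1 : st.1 ≠ [] := any_odd_ne_nil ho
  obtain ⟨me, hme⟩ : ∃ m, PySem.List.max? st.2 (fun x => x) = some m := by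
    cases hmx : PySem.List.max? st.2 (fun x => x) with
    | none => exact absurd ((PySem.List.max?_eq_none_iff _ _).mp hmx) h2
    | some m => exact ⟨m, rfl⟩
  obtain ⟨mo, hmo⟩ : ∃ m, PySem.List.min? st.1 (fun x => x) = some m := by
    cases hmn : PySem.List.min? st.1 (fun x => x) with
    | none => exact absurd ((PySem.List.min?_eq_none_iff _ _).mp hmn) h1
    | some m => exact ⟨m, rfl⟩
  simp [hme, hmo]
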